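-- pv_equiv track=rewrite | github.com/NiklasTiede/Github-Trending-API | src/condensed.py | filter_articles
-- ===== SOURCE A (Python) =====
-- def filter_articles(html: str) -> str:
--     """ Filters html out, which is not enclosed by article-tags.
--     Github trending contains up to 25 repositories/developers.
--
--     why filtering HTML instead of using beautifulsoup directly?
--     Beautifulsoup skips many articles!
--     """
--     all_html = html.split("\n")
--
--     # count number of article tags within the document (varies from 0 to 50):
--     article_tags = 0
--     for line in all_html:
--         if "article" in line:
--             article_tags += 1
--
--     # copy HTML enclosed by first and last article-tag:
--     articles_html, is_Article_HTML = [], False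
--     counter = 0
--     for line in all_html:
--         if "article" in line:
--             article_tags -= 1
--             is_Article_HTML = True
--         if is_Article_HTML:
--             articles_html.append(line)
--         if not article_tags:
--             is_Article_HTML = False
--
--     return "".join(articles_html)
-- ===== SOURCE B (Python) =====
-- def filter_articles(html: str) -> str:
--     """Locate the first and last line containing an article tag, then slice."""
--     all_html = html.split("\n")
--     idxs = [i for i, line in enumerate(all_html) if "article" in line]
--     if not idxs:
--         return ""
--     return "".join(all_html[idxs[0]:idxs[-1] + 1])
-- ===== Notes on version B (the rewrite author's own statement) =====
-- stated objective: simpler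
-- what changed: Replaces A's count pass plus flag/countdown state machine with a locate-boundaries decomposition: collect the indices of lines containing the article-tag substring and join one slice from the first to the last such line.
import Mathlib
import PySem

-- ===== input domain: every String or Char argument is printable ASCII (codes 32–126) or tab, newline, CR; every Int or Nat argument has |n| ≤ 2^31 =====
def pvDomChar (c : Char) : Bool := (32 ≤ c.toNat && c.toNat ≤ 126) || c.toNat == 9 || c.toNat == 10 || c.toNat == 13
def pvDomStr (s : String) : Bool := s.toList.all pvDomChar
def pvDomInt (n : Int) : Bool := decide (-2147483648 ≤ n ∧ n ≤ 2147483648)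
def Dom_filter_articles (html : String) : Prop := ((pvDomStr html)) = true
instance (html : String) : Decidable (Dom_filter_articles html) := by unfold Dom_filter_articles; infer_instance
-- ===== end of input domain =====

-- B replaces A's count pass plus flag/countdown state machine by locating the first and
-- last line containing "article" and joining one slice (same O(n) cost, simpler shape).

-- ===== PORT A =====
def filter_articles (html : String) : String :=
  let all_html := (PySem.Str.split? html "\n").getD []   -- sep is the literal "\n" ≠ "", so split? is always some
  let article_tags : Int := all_html.foldl
    (fun article_tags line => if PySem.Str.isIn "article" line then article_tags + 1 else article_tags) 0
  let st := all_html.foldl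
    (fun (st : List String × Bool × Int) line =>
      let articles_html := st.1
      let is_Article_HTML := st.2.1
      let article_tags := st.2.2
      let article_tags := if PySem.Str.isIn "article" line then article_tags - 1 else article_tags
      let is_Article_HTML := if PySem.Str.isIn "article" line then true else is_Article_HTML
      let articles_html := if is_Article_HTML then articles_html ++ [line] else articles_html
      let is_Article_HTML := if article_tags = 0 then false else is_Article_HTML
      (articles_html, is_Article_HTML, article_tags))
    ([], false, article_tags)
  PySem.Str.join "" st.1

-- ===== PORT B =====
def filter_articles_alt (html : String) : String :=
  let all_html := (PySem.Str.split? html "\n").getD []   -- sep is the literal "\n" ≠ "", so split? is always some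
  let idxs := ((PySem.List.enumerate all_html).filter
      (fun q => PySem.Str.isIn "article" q.2)).map (fun q => q.1)
  match idxs with
  | [] => ""
  | i0 :: rest =>
    PySem.Str.join "" (PySem.List.slice all_html (some i0) (some ((i0 :: rest).getLast (by simp) + 1)))

-- ===== PRECONDITION & SPEC =====
def Spec_filter_articles (html : String) (out : String) : Prop := out = filter_articles_alt html
instance (html : String) (out : String) : Decidable (Spec_filter_articles html out) := by unfold Spec_filter_articles; infer_instance

-- ===== CLAIM (what is proved, stated in full; the proofs are below) =====
def Claim_equal_filter_articles : Prop := ∀ (html : String), Dom_filter_articles html → Spec_filter_articles html (filter_articles html)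

-- ===== LEMMAS AND PROOFS =====

/-- The line predicate both programs use. -/
def pArt (line : String) : Bool := PySem.Str.isIn "article" line

/-- Lines appended while A's flag is raised: everything up to and including the last match. -/
def uptoArt : List String → List String
  | [] => []
  | x :: xs => if xs.countP pArt = 0 then [x] else x :: uptoArt xs

/-- Lines A appends starting with the flag down: from the first match to the last match. -/
def segArt : List String → List String
  | [] => []
  | x :: xs => if pArt x then (if xs.countP pArt = 0 then [x] else x :: uptoArt xs) else segArt xs

lemma segArt_of_count0 {xs : List String} (h : xs.countP pArt = 0) : segArt xs = [] := by
  induction xs with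
  | nil => rfl
  | cons x xs ih =>
    rw [List.countP_cons] at h
    by_cases hp : pArt x
    · simp [hp] at h
    · simp only [hp, Bool.false_eq_true, if_false, add_zero] at h
      simp [segArt, hp, ih h]

/-- A's second loop, started with tags = countP of the remaining lines (the loop invariant),
    appends `uptoArt` if the flag is up (which implies a match remains) and `segArt` otherwise. -/
lemma loopA_eq (xs : List String) (acc : List String) (flag : Bool)
    (h : flag = true → 0 < xs.countP pArt) :
    (xs.foldl
      (fun (st : List String × Bool × Int) line =>
        (if (if pArt line = true then true else st.2.1) = true then st.1 ++ [line] else st.1,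
         if (if pArt line = true then st.2.2 - 1 else st.2.2) = 0 then false
           else if pArt line = true then true else st.2.1,
         if pArt line = true then st.2.2 - 1 else st.2.2))
      (acc, flag, (xs.countP pArt : Int))).1
    = acc ++ (if flag then uptoArt xs else segArt xs) := by
  induction xs generalizing acc flag with
  | nil => cases flag <;> simp [uptoArt, segArt]
  | cons x xs ih =>
    rw [List.foldl_cons]
    by_cases hp : pArt x
    · have htag : ((List.countP pArt (x :: xs) : Int) - 1) = (List.countP pArt xs : Int) := by
        rw [List.countP_cons]; simp [hp]
      simp only [hp, if_true, htag]
      by_cases hc : xs.countP pArt = 0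
      · rw [if_pos (show (List.countP pArt xs : Int) = 0 by exact_mod_cast hc)]
        rw [ih (acc ++ [x]) false (by simp)]
        cases flag <;> simp [uptoArt, segArt, hp, hc, segArt_of_count0 hc]
      · rw [if_neg (show ¬ (List.countP pArt xs : Int) = 0 by exact_mod_cast hc)]
        rw [ih (acc ++ [x]) true (fun _ => Nat.pos_of_ne_zero hc)]
        cases flag <;> simp [uptoArt, segArt, hp, hc]
    · have htag : (List.countP pArt (x :: xs) : Int) = (List.countP pArt xs : Int) := by
        rw [List.countP_cons]; simp [hp]
      simp only [hp, Bool.false_eq_true, if_false, htag]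
      cases flag with
      | false =>
        simp only [Bool.false_eq_true, if_false, ite_self]
        rw [ih acc false (by simp)]
        simp [segArt, hp]
      | true =>
        have hcx : 0 < List.countP pArt (x :: xs) := h rfl
        have hc : 0 < xs.countP pArt := by
          rw [List.countP_cons] at hcx; simpa [hp] using hcx
        rw [if_neg (show ¬ (List.countP pArt xs : Int) = 0 by exact_mod_cast hc.ne')]
        simp only [if_true]
        rw [ih (acc ++ [x]) true (fun _ => hc)]
        simp [uptoArt, hc.ne']

/-- The indices B collects, over an arbitrary enumerate start. -/
def idxsArt (s : Int) (xs : List String) : List Int :=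
  ((PySem.List.enumerate xs s).filter (fun q => pArt q.2)).map (fun q => q.1)

lemma idxsArt_cons (s : Int) (x : String) (xs : List String) :
    idxsArt s (x :: xs) = if pArt x then s :: idxsArt (s + 1) xs else idxsArt (s + 1) xs := by
  by_cases hp : pArt x <;> simp [idxsArt, PySem.List.enumerate_cons, hp]

lemma idxsArt_shift (xs : List String) (s : Int) :
    idxsArt s xs = (idxsArt 0 xs).map (fun i => i + s) := by
  induction xs generalizing s with
  | nil => simp [idxsArt]
  | cons x xs ih =>
    rw [idxsArt_cons, idxsArt_cons, ih (s + 1), ih (0 + 1)]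
    by_cases hp : pArt x <;>
      simp only [hp, if_true, Bool.false_eq_true, if_false, List.map_cons, List.map_map,
        Function.comp_def, zero_add]
    · exact congrArg (s :: ·) (List.map_congr_left fun i _ => by ring)
    · exact List.map_congr_left fun i _ => by ring

lemma idxsArt_eq_nil_iff (xs : List String) : idxsArt 0 xs = [] ↔ xs.countP pArt = 0 := by
  induction xs with
  | nil => simp [idxsArt]
  | cons x xs ih =>
    rw [idxsArt_cons, idxsArt_shift xs (0 + 1), List.countP_cons]
    by_cases hp : pArt x <;> simp [hp, ih]

lemma idxsArt_nonneg {xs : List String} {j : Int} (h : j ∈ idxsArt 0 xs) : 0 ≤ j := by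
  induction xs generalizing j with
  | nil => simp [idxsArt] at h
  | cons x xs ih =>
    rw [idxsArt_cons, idxsArt_shift xs (0 + 1)] at h
    by_cases hp : pArt x <;> simp only [hp, if_true, Bool.false_eq_true, if_false,
      List.mem_cons, List.mem_map] at h
    · rcases h with rfl | ⟨i, hi, rfl⟩
      · exact le_refl 0
      · have := ih hi; omega
    · rcases h with ⟨i, hi, rfl⟩
      have := ih hi; omega

lemma getLast_map_add (l : List Int) (hl : l ≠ []) (t : Int)
    (h2 : l.map (fun i => i + t) ≠ []) :
    (l.map (fun i => i + t)).getLast h2 = l.getLast hl + t := by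
  have h1 := List.getLast?_map (f := fun i => i + t) (l := l)
  rw [List.getLast?_eq_some_getLast h2, List.getLast?_eq_some_getLast hl] at h1
  simp only [Option.map_some, Option.some.injEq] at h1
  exact h1

/-- When the tail still contains a match, the last collected index of `x :: xs`
    is the last collected index of `xs`, shifted by one. -/
lemma getLast_idxs_cons {j0 i0 : Int} {rs rest : List Int}
    (h : (if pArt x' = true then (0 : Int) :: (j0 :: rs).map (fun i => i + (0 + 1))
          else (j0 :: rs).map (fun i => i + (0 + 1))) = i0 :: rest) :
    (i0 :: rest).getLast (by simp) = (j0 :: rs).getLast (by simp) + (0 + 1) := by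
  have h? : (i0 :: rest).getLast? = ((j0 :: rs).map (fun i => i + (0 + 1))).getLast? := by
    by_cases hp : pArt x' <;> simp only [hp, if_true, Bool.false_eq_true, if_false] at h
    · rw [← h]
      simp only [List.map_cons, List.getLast?_cons_cons]
    · rw [← h]
  rw [List.getLast?_eq_some_getLast (l := i0 :: rest) (by simp),
      List.getLast?_eq_some_getLast (l := (j0 :: rs).map (fun i => i + (0 + 1))) (by simp),
      getLast_map_add (j0 :: rs) (by simp) (0 + 1) (by simp)] at h?
  exact Option.some.inj h?

/-- The last collected index marks the end of `uptoArt`. -/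
lemma uptoArt_eq_take (xs : List String) (i0 : Int) (rest : List Int)
    (h : idxsArt 0 xs = i0 :: rest) :
    uptoArt xs = xs.take (((i0 :: rest).getLast (by simp) + 1).toNat) := by
  induction xs generalizing i0 rest with
  | nil => simp [idxsArt] at h
  | cons x xs ih =>
    rw [idxsArt_cons, idxsArt_shift xs (0 + 1)] at h
    cases hidx : idxsArt 0 xs with
    | nil =>
      have hc : xs.countP pArt = 0 := (idxsArt_eq_nil_iff xs).mp hidx
      rw [hidx] at h
      by_cases hp : pArt x
      · simp only [hp, if_true, List.map_nil] at h
        obtain ⟨rfl, rfl⟩ := List.cons_eq_cons.mp h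
        simp [uptoArt, hc]
      · simp [hp] at h
    | cons j0 rs =>
      have hc : xs.countP pArt ≠ 0 := by
        intro h0
        rw [(idxsArt_eq_nil_iff xs).mpr h0] at hidx
        cases hidx
      have hg0 : 0 ≤ (j0 :: rs).getLast (by simp) :=
        idxsArt_nonneg (by rw [hidx]; exact List.getLast_mem (by simp))
      rw [hidx] at h
      rw [getLast_idxs_cons h]
      have hnat : (((j0 :: rs).getLast (by simp) + (0 + 1) + 1)).toNat
          = (((j0 :: rs).getLast (by simp) + 1)).toNat + 1 := by omega
      rw [hnat, List.take_succ_cons, ← ih j0 rs hidx]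
      simp [uptoArt, hc]

/-- The slice B takes is exactly `segArt`. -/
lemma slice_eq_segArt (xs : List String) (i0 : Int) (rest : List Int)
    (h : idxsArt 0 xs = i0 :: rest) :
    PySem.List.slice xs (some i0) (some ((i0 :: rest).getLast (by simp) + 1)) = segArt xs := by
  induction xs generalizing i0 rest with
  | nil => simp [idxsArt] at h
  | cons x xs ih =>
    rw [idxsArt_cons, idxsArt_shift xs (0 + 1)] at h
    cases hidx : idxsArt 0 xs with
    | nil =>
      have hc : xs.countP pArt = 0 := (idxsArt_eq_nil_iff xs).mp hidx
      rw [hidx] at h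
      by_cases hp : pArt x
      · simp only [hp, if_true, List.map_nil] at h
        obtain ⟨rfl, rfl⟩ := List.cons_eq_cons.mp h
        rw [PySem.List.slice_toNat _ (le_refl 0) (by simp)]
        simp [segArt, hp, hc, List.getLast_singleton]
      · simp [hp] at h
    | cons j0 rs =>
      have hc : xs.countP pArt ≠ 0 := by
        intro h0
        rw [(idxsArt_eq_nil_iff xs).mpr h0] at hidx
        cases hidx
      have hg0 : 0 ≤ (j0 :: rs).getLast (by simp) :=
        idxsArt_nonneg (by rw [hidx]; exact List.getLast_mem (by simp))
      have hj0 : 0 ≤ j0 := idxsArt_nonneg (by rw [hidx]; exact List.mem_cons_self ..)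
      rw [hidx] at h
      rw [getLast_idxs_cons h]
      by_cases hp : pArt x
      · simp only [hp, if_true] at h
        obtain ⟨rfl, -⟩ := List.cons_eq_cons.mp h
        rw [PySem.List.slice_toNat _ (le_refl 0) (by omega)]
        have hnat : ((j0 :: rs).getLast (by simp) + (0 + 1) + 1).toNat - (0 : Int).toNat
            = (((j0 :: rs).getLast (by simp) + 1)).toNat + 1 := by omega
        rw [hnat]
        simp only [Int.toNat_zero, List.drop_zero, List.take_succ_cons]
        have := uptoArt_eq_take xs j0 rs hidx
        simp [segArt, hp, hc, ← this]
      · simp only [hp, Bool.false_eq_true, if_false, List.map_cons] at h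
        obtain ⟨rfl, -⟩ := List.cons_eq_cons.mp h
        rw [PySem.List.slice_toNat _ (by omega) (by omega)]
        have hd : (j0 + (0 + 1)).toNat = j0.toNat + 1 := by omega
        rw [hd, List.drop_succ_cons]
        have hnat : ((j0 :: rs).getLast (by simp) + (0 + 1) + 1).toNat - (j0.toNat + 1)
            = (((j0 :: rs).getLast (by simp) + 1)).toNat - j0.toNat := by omega
        rw [hnat]
        rw [← PySem.List.slice_toNat _ hj0 (by omega), ih j0 rs hidx]
        simp [segArt, hp]

/-- Both ports, after sharing the split, compute the same string. -/
lemma main_eq (lines : List String) :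
    PySem.Str.join ""
      (lines.foldl
        (fun (st : List String × Bool × Int) line =>
          (if (if pArt line = true then true else st.2.1) = true then st.1 ++ [line] else st.1,
           if (if pArt line = true then st.2.2 - 1 else st.2.2) = 0 then false
             else if pArt line = true then true else st.2.1,
           if pArt line = true then st.2.2 - 1 else st.2.2))
        ([], false, (lines.countP pArt : Int))).1
    = match idxsArt 0 lines with
      | [] => ""
      | i0 :: rest =>
        PySem.Str.join "" (PySem.List.slice lines (some i0) (some ((i0 :: rest).getLast (by simp) + 1))) := by
  rw [loopA_eq lines [] false (by simp)]
  cases h : idxsArt 0 lines with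
  | nil =>
    rw [segArt_of_count0 ((idxsArt_eq_nil_iff lines).mp h)]
    rfl
  | cons i0 rest =>
    simp only [List.nil_append, if_neg (by simp : ¬ (false = true))]
    rw [← slice_eq_segArt lines i0 rest h]

-- ===== VERDICT (by name: the statement is the Claim_ definition above) =====
theorem filter_articles_spec : Claim_equal_filter_articles := by
  intro html _
  unfold Spec_filter_articles filter_articles filter_articles_alt
  simp only []
  rw [PySem.List.foldl_count_if (fun line => PySem.Str.isIn "article" line)
      ((PySem.Str.split? html "\n").getD []) 0, zero_add]
  exact main_eq ((PySem.Str.split? html "\n").getD [])
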